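-- pv_equiv track=rewrite | github.com/Y45H-GitHub/job-sankey | job_sankey/classifier.py | is_job_related
-- ===== SOURCE A (Python) =====
-- def is_job_related(
--     record: dict,
--     blocked_domains: set[str],
-- ) -> bool:
--     """
--     Pre-filter: return True only if this email is likely about a job
--     application. Skips product emails, newsletters, certificates, etc.
--     """
--     domain = record.get("sender_domain", "")
--
--     # Check domain and all parent domains against the blocklist
--     parts = domain.split(".")
--     for i in range(len(parts)):
--         if ".".join(parts[i:]) in blocked_domains:
--             return False
--
--     # Check full sender address (for entries like user@specific.com)
--     sender = record.get("sender", "")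
--     for blocked in blocked_domains:
--         if "@" in blocked and sender == blocked:
--             return False
--
--     # Keyword heuristic: must contain at least one job-related term
--     subject = record.get("subject", "").lower()
--     body = record.get("body_snippet", "").lower()[:1000]
--     text = f"{subject} {body}"
--
--     job_signals = [
--         "application", "applying", "applied", "apply",
--         "role", "position", "job", "career", "hiring",
--         "intern", "engineer", "developer", "software",
--         "interview", "assessment", "candidacy", "candidate",
--         "offer letter", "offer", "recruit", "resume",
--         "shortlist", "reject", "unfortunately", "regret",
--         "coding challenge", "coding test", "hackerrank",
--         "thank you for", "thanks for applying",
--         "received your", "we received",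
--     ]
--     return any(signal in text for signal in job_signals)
-- ===== SOURCE B (Python) =====
-- JOB_SIGNALS = [
--     "application", "applying", "applied", "apply",
--     "role", "position", "job", "career", "hiring",
--     "intern", "engineer", "developer", "software",
--     "interview", "assessment", "candidacy", "candidate",
--     "offer letter", "offer", "recruit", "resume",
--     "shortlist", "reject", "unfortunately", "regret",
--     "coding challenge", "coding test", "hackerrank",
--     "thank you for", "thanks for applying",
--     "received your", "we received",
-- ]
--
-- # Index the signals by first character, so a single scan of the text only
-- # has to test the handful of signals that could start at each position.
-- BY_FIRST = {}
-- for _sig in JOB_SIGNALS: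
--     BY_FIRST.setdefault(_sig[0], []).append(_sig)
--
--
-- def is_job_related(
--     record: dict,
--     blocked_domains: set[str],
-- ) -> bool:
--     """
--     Pre-filter: return True only if this email is likely about a job
--     application. Skips product emails, newsletters, certificates, etc.
--     """
--     # Blocklist: build each parent suffix back-to-front by one accumulating
--     # concatenation instead of re-joining a slice per index.
--     domain = record.get("sender_domain", "")
--     suf = None
--     for part in reversed(domain.split(".")):
--         suf = part if suf is None else part + "." + suf
--         if suf in blocked_domains:
--             return False
--
--     # Full-address blocklist entries contain '@', so one membership test does.
--     sender = record.get("sender", "")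
--     if "@" in sender and sender in blocked_domains:
--         return False
--
--     # Keyword heuristic: one left-to-right scan of the text, testing at each
--     # position only the signals that start with the character found there.
--     subject = record.get("subject", "").lower()
--     body = record.get("body_snippet", "").lower()[:1000]
--     text = f"{subject} {body}"
--     for i, ch in enumerate(text):
--         for sig in BY_FIRST.get(ch, ()):
--             if text.startswith(sig, i):
--                 return True
--     return False
-- ===== Notes on version B (the rewrite author's own statement) =====
-- stated objective: alternative
-- what changed: The blocklist suffix check builds each parent suffix by one back-to-front accumulating concatenation instead of re-joining parts[i:] for every index, the per-element sender loop becomes a single membership test on the sender, and the keyword heuristic becomes one scan of the text driven by a precomputed first-character index of the signals instead of 38 independent 'in' substring scans.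
import Mathlib
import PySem

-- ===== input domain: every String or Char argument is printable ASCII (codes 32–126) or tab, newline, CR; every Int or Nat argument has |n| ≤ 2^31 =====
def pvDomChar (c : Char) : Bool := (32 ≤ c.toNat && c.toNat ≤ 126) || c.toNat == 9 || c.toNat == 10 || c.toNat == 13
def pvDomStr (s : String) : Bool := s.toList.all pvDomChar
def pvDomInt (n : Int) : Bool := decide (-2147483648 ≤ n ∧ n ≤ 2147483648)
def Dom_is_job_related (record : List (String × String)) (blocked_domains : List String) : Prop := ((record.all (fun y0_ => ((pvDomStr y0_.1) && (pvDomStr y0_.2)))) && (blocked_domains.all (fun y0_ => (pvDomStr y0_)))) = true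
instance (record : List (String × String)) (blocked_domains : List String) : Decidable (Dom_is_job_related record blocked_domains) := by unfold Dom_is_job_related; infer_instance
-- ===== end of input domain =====

-- B builds each blocklist parent suffix by one back-to-front accumulating pass, checks the
-- sender by a single membership test, and drives the keyword scan by a first-character
-- index of the signals; objective: alternative (same result, different traversals).

-- the shared keyword table (data, used by both ports)
def jobSignals : List String :=
  ["application", "applying", "applied", "apply",
   "role", "position", "job", "career", "hiring",
   "intern", "engineer", "developer", "software",
   "interview", "assessment", "candidacy", "candidate",
   "offer letter", "offer", "recruit", "resume",
   "shortlist", "reject", "unfortunately", "regret",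
   "coding challenge", "coding test", "hackerrank",
   "thank you for", "thanks for applying",
   "received your", "we received"]

-- ===== PORT A =====
def is_job_related (record : List (String × String)) (blocked_domains : List String) : Bool :=
  let domain := (PySem.Dict.mk record).getD "sender_domain" ""
  let parts := (PySem.Chars.splitOn domain.toList ".".toList).map String.ofList
  -- for i in range(len(parts)): if ".".join(parts[i:]) in blocked_domains: return False
  if (List.range parts.length).any
      (fun i => blocked_domains.contains (PySem.Str.join "." (parts.drop i))) then
    false
  else
    let sender := (PySem.Dict.mk record).getD "sender" ""
    -- for blocked in blocked_domains: if "@" in blocked and sender == blocked: return False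
    if blocked_domains.any (fun blocked => PySem.Str.isIn "@" blocked && sender == blocked) then
      false
    else
      let subject := PySem.Str.lower ((PySem.Dict.mk record).getD "subject" "")
      let body := PySem.Str.slice (PySem.Str.lower ((PySem.Dict.mk record).getD "body_snippet" "")) none (some 1000)
      let text := subject ++ " " ++ body
      jobSignals.any (fun signal => PySem.Str.isIn signal text)

-- ===== PORT B =====
-- BY_FIRST: for sig in JOB_SIGNALS: BY_FIRST.setdefault(sig[0], []).append(sig)
-- (sig[0] = sig.toList.headI is exact: every signal is nonempty)
def byFirst : PySem.Dict Char (List String) :=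
  jobSignals.foldl (fun d sig => d.modify sig.toList.headI [] (· ++ [sig])) PySem.Dict.empty

-- 'for part in reversed(parts): suf = part if suf is None else part + "." + suf;
--    if suf in blocked_domains: return False' (true = hit the blocklist)
def sufLoop (bl : List String) : List String → Option String → Bool
  | [], _ => false
  | p :: rest, acc =>
    let suf := match acc with | none => p | some s => p ++ "." ++ s
    if bl.contains suf then true else sufLoop bl rest (some suf)

def is_job_related_alt (record : List (String × String)) (blocked_domains : List String) : Bool :=
  let domain := (PySem.Dict.mk record).getD "sender_domain" ""
  if sufLoop blocked_domains ((PySem.Chars.splitOn domain.toList ".".toList).map String.ofList).reverse none then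
    false
  else
    let sender := (PySem.Dict.mk record).getD "sender" ""
    if PySem.Str.isIn "@" sender && blocked_domains.contains sender then
      false
    else
      let subject := PySem.Str.lower ((PySem.Dict.mk record).getD "subject" "")
      let body := PySem.Str.slice (PySem.Str.lower ((PySem.Dict.mk record).getD "body_snippet" "")) none (some 1000)
      let text := subject ++ " " ++ body
      let tl := text.toList
      -- for i, ch in enumerate(text): for sig in BY_FIRST.get(ch, ()):
      --   if text.startswith(sig, i): return True
      -- (text.startswith(sig, i) with 0 ≤ i from enumerate is 'sig is a prefix of text[i:]')
      (PySem.List.enumerate tl 0).any (fun p =>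
        (byFirst.getD p.2 []).any (fun sig =>
          PySem.Chars.startswith (tl.drop p.1.toNat) sig.toList))

-- ===== PRECONDITION & SPEC =====
def Spec_is_job_related (record : List (String × String)) (blocked_domains : List String) (out : Bool) : Prop := out = is_job_related_alt record blocked_domains
instance (record : List (String × String)) (blocked_domains : List String) (out : Bool) : Decidable (Spec_is_job_related record blocked_domains out) := by unfold Spec_is_job_related; infer_instance

-- ===== CLAIM (what is proved, stated in full; the proofs are below) =====
def Claim_equal_is_job_related : Prop := ∀ (record : List (String × String)) (blocked_domains : List String), Dom_is_job_related record blocked_domains → Spec_is_job_related record blocked_domains (is_job_related record blocked_domains)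

-- ===== LEMMAS AND PROOFS =====

-- the accumulator value after consuming the (reversed) tail t of the parts list
def accOf : List String → Option String
  | [] => none
  | t@(_ :: _) => some (PySem.Str.join "." t)

-- ".".join(p :: t) = p, resp. p ++ "." ++ ".".join(t)
theorem strJoin_cons (p : String) (t : List String) :
    PySem.Str.join "." (p :: t) =
      (match accOf t with | none => p | some s => p ++ "." ++ s) := by
  cases t with
  | nil =>
    apply String.toList_inj.mp
    simp [PySem.Str.toList_join, PySem.Chars.join_singleton, accOf]
  | cons q r =>
    apply String.toList_inj.mp
    simp [PySem.Str.toList_join, PySem.Chars.join_cons_cons, accOf]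

-- B's accumulating loop hits the blocklist iff ".".join of some tail of the original list does
theorem sufLoop_eq (bl : List String) (v : List String) : ∀ (t : List String),
    sufLoop bl v (accOf t) =
      decide (∃ i, i < v.length ∧
        bl.contains (PySem.Str.join "." (v.reverse.drop i ++ t)) = true) := by
  induction v with
  | nil => intro t; simp [sufLoop]
  | cons p rest ih =>
    intro t
    have ih' := ih (p :: t)
    simp only [accOf] at ih'
    simp only [sufLoop]
    rw [← strJoin_cons p t, ih']
    rw [Bool.eq_iff_iff]
    constructor
    · intro h
      split_ifs at h with hc
      · exact decide_eq_true (⟨rest.length, by simp, by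
          have : (rest.reverse ++ [p]).drop rest.length ++ t = p :: t := by
            simp
          simpa [List.reverse_cons, this] using hc⟩)
      · obtain ⟨i, hi, hcon⟩ := of_decide_eq_true h
        refine decide_eq_true ⟨i, by simpa using Nat.lt_succ_of_lt hi, ?_⟩
        have hdrop : (rest.reverse ++ [p]).drop i = rest.reverse.drop i ++ [p] := by
          rw [List.drop_append_of_le_length (by simpa using hi.le)]
        simpa [List.reverse_cons, hdrop] using hcon
    · intro h
      obtain ⟨i, hi, hcon⟩ := of_decide_eq_true h
      rcases Nat.lt_succ_iff_lt_or_eq.mp (by simpa using hi) with hlt | heq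
      · have hdrop : (rest.reverse ++ [p]).drop i = rest.reverse.drop i ++ [p] := by
          rw [List.drop_append_of_le_length (by simpa using hlt.le)]
        rw [List.reverse_cons, hdrop] at hcon
        split_ifs with hc
        · rfl
        · exact decide_eq_true ⟨i, hlt, by simpa using hcon⟩
      · subst heq
        have : (rest.reverse ++ [p]).drop rest.reverse.length ++ t = p :: t := by simp
        rw [List.reverse_cons] at hcon
        rw [show rest.length = rest.reverse.length by simp] at hcon
        rw [this] at hcon
        simp only [List.contains_iff_mem] at hcon
        simp [hcon]

-- specialised to the whole (reversed) parts list: = A's indexed suffix scan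
theorem sufLoop_none_eq (bl parts : List String) :
    sufLoop bl parts.reverse none =
      (List.range parts.length).any
        (fun i => bl.contains (PySem.Str.join "." (parts.drop i))) := by
  have h := sufLoop_eq bl parts.reverse []
  simp only [accOf] at h
  rw [h, Bool.eq_iff_iff]
  simp [List.any_eq_true, List.mem_range]

-- the sender checks agree
theorem sender_eq (bl : List String) (sender : String) :
    bl.any (fun blocked => PySem.Str.isIn "@" blocked && sender == blocked) =
      (PySem.Str.isIn "@" sender && bl.contains sender) := by
  rw [Bool.eq_iff_iff]
  simp only [List.any_eq_true, Bool.and_eq_true, beq_iff_eq, List.contains_iff_mem]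
  constructor
  · rintro ⟨b, hb, h1, rfl⟩; exact ⟨h1, hb⟩
  · rintro ⟨h1, hb⟩; exact ⟨sender, hb, h1, rfl⟩

-- the first-character index holds, under c, exactly the signals starting with c
theorem bucket_eq (c : Char) :
    byFirst.getD c [] = jobSignals.filter (fun s => s.toList.headI == c) := by
  have h : byFirst = (jobSignals.map (fun s => (s.toList.headI, s))).foldl
      (fun d p => d.modify p.1 [] (· ++ [p.2])) PySem.Dict.empty := by
    rw [List.foldl_map]
    rfl
  rw [h, PySem.Dict.getD_foldl_modify_append, PySem.Dict.getD_empty]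
  rw [List.filter_map, List.map_map]
  simp [Function.comp_def]

-- the bucket-driven scan of the text = per-signal substring tests
theorem keyword_eq (text : String) :
    (PySem.List.enumerate text.toList 0).any (fun p =>
        (byFirst.getD p.2 []).any (fun sig =>
          PySem.Chars.startswith (text.toList.drop p.1.toNat) sig.toList)) =
      jobSignals.any (fun signal => PySem.Str.isIn signal text) := by
  rw [Bool.eq_iff_iff]
  simp only [List.any_eq_true, PySem.List.mem_enumerate_iff, PySem.Chars.startswith_iff,
    PySem.Str.isIn_iff_infix, bucket_eq, List.mem_filter, beq_iff_eq]
  constructor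
  · rintro ⟨p, ⟨k, hk, rfl⟩, sig, ⟨hsig, _⟩, hpre⟩
    refine ⟨sig, hsig, ?_⟩
    have h1 : ((0 : Int) + (k : Int)).toNat = k := by omega
    rw [h1] at hpre
    exact hpre.isInfix.trans (List.drop_suffix k text.toList).isInfix
  · rintro ⟨sig, hsig, hinf⟩
    have hne : sig.toList ≠ [] := by
      have : ∀ s ∈ jobSignals, s.toList ≠ [] := by decide
      exact this sig hsig
    obtain ⟨c, rest, hcr⟩ := List.exists_cons_of_ne_nil hne
    obtain ⟨pre, suf, heq⟩ := hinf
    have hk : pre.length < text.toList.length := by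
      rw [← heq, hcr]; simp
    have hdrop : text.toList.drop pre.length = sig.toList ++ suf := by
      rw [← heq, List.append_assoc, List.drop_left]
    have hget : text.toList[pre.length]'hk = c := by
      have hlen : 0 < (text.toList.drop pre.length).length := by
        rw [hdrop, hcr]; simp
      have h1 : (text.toList.drop pre.length)[0]'hlen = c := by
        simp [hdrop, hcr]
      rw [List.getElem_drop] at h1
      simpa using h1
    refine ⟨((0 : Int) + (pre.length : Int), text.toList[pre.length]'hk),
      ⟨pre.length, hk, rfl⟩, sig, ⟨hsig, by rw [hget, hcr]; rfl⟩, ?_⟩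
    have h1 : ((0 : Int) + (pre.length : Int)).toNat = pre.length := by omega
    rw [h1, hdrop]
    exact ⟨suf, rfl⟩

-- ===== VERDICT (by name: the statement is the Claim_ definition above) =====
theorem is_job_related_spec : Claim_equal_is_job_related := by
  intro record blocked_domains _
  unfold Spec_is_job_related
  simp only [is_job_related, is_job_related_alt]
  rw [sufLoop_none_eq, sender_eq, keyword_eq]
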